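-- pv_equiv track=rewrite | github.com/kkr010128/codebert | problem052/problem052_51.py | func
-- ===== SOURCE A (Python) =====
-- def func(n):
--     x = []
--     for i in range(1,n+1):
--         num = i
--         if i % 3 == 0:
--             x.append(i)
--         else:
--             while num:
--                 if int(num % 10) == 3:
--                     x.append(i)
--                     break
--                 num = int(num / 10)
--     return x
-- ===== SOURCE B (Python) =====
-- def func(n):
--     mult3 = range(3, n + 1, 3)
--     with_digit_3 = (i for i in range(1, n + 1) if '3' in str(i))
--     return sorted(set(mult3).union(with_digit_3))
-- ===== Notes on version B (the rewrite author's own statement) =====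
-- stated objective: alternative
-- what changed: Instead of one pass that tests each i with a per-element branch and an inner digit-extraction while-loop, B builds the answer from two separately generated collections - the arithmetic progression of multiples of 3 and a string-based digit test for numbers containing a 3 - and returns the sorted set union of the two.
import Mathlib
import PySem

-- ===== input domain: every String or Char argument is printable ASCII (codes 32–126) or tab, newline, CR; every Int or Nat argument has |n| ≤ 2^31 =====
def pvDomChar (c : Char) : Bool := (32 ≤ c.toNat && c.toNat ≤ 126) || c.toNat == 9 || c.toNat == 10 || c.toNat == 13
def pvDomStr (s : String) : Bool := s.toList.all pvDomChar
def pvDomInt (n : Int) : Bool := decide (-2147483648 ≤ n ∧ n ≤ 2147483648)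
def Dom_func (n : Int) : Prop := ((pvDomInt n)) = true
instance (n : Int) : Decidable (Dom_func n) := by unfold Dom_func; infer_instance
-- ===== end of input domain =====

-- B replaces A's single predicate-tested pass (with an inner digit-extraction while-loop)
-- by two separately generated collections — the arithmetic progression of multiples of 3
-- and the string-tested numbers containing the digit '3' — combined as sorted(set union).

-- ===== PORT A =====
-- A's inner `while num:` loop: the loop variable is always ≥ 1 on entry (num = i ∈ range(1, n+1)),
-- and for such values Python's `int(num / 10)` equals num // 10 on the stated |n| ≤ 2^31 domain,
-- so the loop is ported on Nat with Nat division (exact there); it returns whether the loop appended i.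
def funcDigitLoop : Nat → Bool
  | 0 => false
  | (m + 1) => if (m + 1) % 10 == 3 then true else funcDigitLoop ((m + 1) / 10)
decreasing_by exact Nat.div_lt_self (Nat.succ_pos m) (by omega)

def func (n : Int) : List Int :=
  (PySem.List.pyRange 1 (n + 1) 1).foldl
    (fun x i =>
      if PySem.Int.mod i 3 == 0 then x ++ [i]
      else if funcDigitLoop i.toNat then x ++ [i] else x) []

-- ===== PORT B =====
def func_alt (n : Int) : List Int :=
  let mult3 := PySem.List.pyRange 3 (n + 1) 3
  let withDigit3 := (PySem.List.pyRange 1 (n + 1) 1).filter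
    (fun i => PySem.Str.isIn "3" (PySem.Int.toStr i))
  PySem.List.sorted (PySem.Set.update (PySem.Set.ofList mult3) withDigit3) (fun x => x) false

-- ===== PRECONDITION & SPEC =====
def Spec_func (n : Int) (out : List Int) : Prop := out = func_alt n
instance (n : Int) (out : List Int) : Decidable (Spec_func n out) := by unfold Spec_func; infer_instance

-- ===== CLAIM (what is proved, stated in full; the proofs are below) =====
def Claim_equal_func : Prop := ∀ (n : Int), Dom_func n → Spec_func n (func n)

-- ===== LEMMAS AND PROOFS =====

-- The predicate A effectively tests each i ∈ range(1, n+1) with.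
def funcPred (i : Int) : Bool := (PySem.Int.mod i 3 == 0) || funcDigitLoop i.toNat

theorem funcDigitLoop_pos (m : Nat) (h : m ≠ 0) :
    funcDigitLoop m = ((m % 10 == 3) || funcDigitLoop (m / 10)) := by
  cases m with
  | zero => exact absurd rfl h
  | succ k =>
    rw [funcDigitLoop]
    cases h3 : ((k + 1) % 10 == 3) <;> simp [h3]

theorem digitChar_eq_three (k : Nat) (hk : k < 10) : Nat.digitChar k = '3' ↔ k = 3 := by
  interval_cases k <;> simp [Nat.digitChar]

theorem mem_toDigitsCore (fuel : Nat) : ∀ (m : Nat) (ds : List Char), m < fuel →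
    ('3' ∈ Nat.toDigitsCore 10 fuel m ds ↔
      ((m % 10 = 3 ∨ funcDigitLoop (m / 10) = true) ∨ '3' ∈ ds)) := by
  induction fuel with
  | zero => intro m ds h; omega
  | succ f ih =>
    intro m ds h
    simp only [Nat.toDigitsCore]
    by_cases h0 : m / 10 = 0
    · simp only [h0, if_true, List.mem_cons, funcDigitLoop]
      have : Nat.digitChar (m % 10) = '3' ↔ m % 10 = 3 :=
        digitChar_eq_three _ (Nat.mod_lt _ (by omega))
      constructor
      · rintro (hc | hds)
        · exact Or.inl (Or.inl (this.mp hc.symm))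
        · exact Or.inr hds
      · rintro ((h3 | hF) | hds)
        · exact Or.inl (this.mpr h3).symm
        · simp at hF
        · exact Or.inr hds
    · simp only [h0, if_false]
      have hm10 : m / 10 < m := Nat.div_lt_self (by omega) (by omega)
      rw [ih (m / 10) _ (by omega)]
      rw [funcDigitLoop_pos (m / 10) h0]
      have : Nat.digitChar (m % 10) = '3' ↔ m % 10 = 3 :=
        digitChar_eq_three _ (Nat.mod_lt _ (by omega))
      simp only [List.mem_cons, Bool.or_eq_true, beq_iff_eq]
      constructor
      · rintro ((ha | hb) | (hc | hds))
        · exact Or.inl (Or.inr (Or.inl ha))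
        · exact Or.inl (Or.inr (Or.inr hb))
        · exact Or.inl (Or.inl (this.mp hc.symm))
        · exact Or.inr hds
      · rintro ((h3 | (ha | hb)) | hds)
        · exact Or.inr (Or.inl (this.mpr h3).symm)
        · exact Or.inl (Or.inl ha)
        · exact Or.inl (Or.inr hb)
        · exact Or.inr (Or.inr hds)

theorem digitLoop_iff_mem_toDigits (m : Nat) (h : 1 ≤ m) :
    funcDigitLoop m = true ↔ '3' ∈ Nat.toDigits 10 m := by
  unfold Nat.toDigits
  rw [mem_toDigitsCore (m + 1) m [] (by omega), funcDigitLoop_pos m (by omega)]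
  simp [or_comm]

theorem isIn_three_eq_digitLoop (i : Int) (h : 1 ≤ i) :
    PySem.Str.isIn "3" (PySem.Int.toStr i) = funcDigitLoop i.toNat := by
  have hsing : ∀ (l : List Char), ['3'] <:+: l ↔ '3' ∈ l := by
    intro l
    constructor
    · intro hinf; exact hinf.subset (by simp)
    · intro hm
      obtain ⟨s, t, rfl⟩ := List.append_of_mem hm
      exact ⟨s, t, by simp⟩
  have htc : PySem.Int.toChars i = Nat.toDigits 10 i.toNat := by
    unfold PySem.Int.toChars
    rw [if_neg (by omega)]
  have hlist : (PySem.Int.toStr i).toList = Nat.toDigits 10 i.toNat := by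
    rw [PySem.Int.toList_toStr, htc]
  have hiff : PySem.Str.isIn "3" (PySem.Int.toStr i) = true ↔ funcDigitLoop i.toNat = true := by
    rw [PySem.Str.isIn_iff_infix, hlist]
    show ['3'] <:+: _ ↔ _
    rw [hsing, digitLoop_iff_mem_toDigits i.toNat (by omega)]
  cases hb : funcDigitLoop i.toNat
  · simpa [hb] using hiff
  · simpa [hb] using hiff

theorem func_eq_filter (n : Int) :
    func n = (PySem.List.pyRange 1 (n + 1) 1).filter funcPred := by
  unfold func
  have hfun : (fun (x : List Int) (i : Int) =>
      if PySem.Int.mod i 3 == 0 then x ++ [i]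
      else if funcDigitLoop i.toNat then x ++ [i] else x)
      = (fun (x : List Int) (i : Int) => if funcPred i then x ++ [i] else x) := by
    funext x i
    unfold funcPred
    cases h1 : (PySem.Int.mod i 3 == 0) <;> cases h2 : funcDigitLoop i.toNat <;> simp [h1, h2]
  rw [hfun, PySem.List.foldl_append_if_eq_filter funcPred _ []]
  simp

theorem func_alt_eq_filter (n : Int) :
    func_alt n = (PySem.List.pyRange 1 (n + 1) 1).filter funcPred := by
  unfold func_alt
  apply PySem.List.sorted_eq_of_perm_of_pairwise_lt
  · -- the filtered range is a permutation of the built set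
    apply (List.perm_ext_iff_of_nodup
      ((PySem.List.nodup_pyRange_one 1 (n + 1)).filter _)
      (PySem.Set.nodup_update _ _ (PySem.Set.nodup_ofList _))).mpr
    intro x
    rw [PySem.Set.mem_update, PySem.Set.mem_ofList, List.mem_filter, List.mem_filter,
      PySem.List.mem_pyRange_one,
      PySem.List.mem_pyRange_iff_of_pos (a := 3) (b := n + 1) (s := 3) (by norm_num) x]
    unfold funcPred
    constructor
    · rintro ⟨⟨h1, h2⟩, hp⟩
      rcases Bool.or_eq_true _ _ ▸ hp with h3 | hd
      · refine Or.inl ⟨?_, h2, ?_⟩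
        · rcases (PySem.Int.mod_eq_zero_iff_dvd x 3).mp (by simpa using h3) with ⟨k, rfl⟩
          omega
        · rcases (PySem.Int.mod_eq_zero_iff_dvd x 3).mp (by simpa using h3) with ⟨k, hk⟩
          exact ⟨k - 1, by omega⟩
      · exact Or.inr ⟨⟨h1, h2⟩, by rw [isIn_three_eq_digitLoop x h1]; exact hd⟩
    · rintro (⟨h1, h2, ⟨k, hk⟩⟩ | ⟨⟨h1, h2⟩, hd⟩)
      · refine ⟨⟨by omega, h2⟩, ?_⟩
        simp only [Bool.or_eq_true, beq_iff_eq, PySem.Int.mod_eq_zero_iff_dvd]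
        exact Or.inl ⟨k + 1, by omega⟩
      · refine ⟨⟨h1, h2⟩, ?_⟩
        rw [isIn_three_eq_digitLoop x h1] at hd
        simp [hd]
  · exact (PySem.List.pairwise_lt_pyRange_one 1 (n + 1)).filter _

-- ===== VERDICT (by name: the statement is the Claim_ definition above) =====
theorem func_spec : Claim_equal_func := by
  intro n _
  unfold Spec_func
  rw [func_eq_filter, func_alt_eq_filter]
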